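-- pv_equiv track=rewrite | github.com/Markrock342/nursejob | scripts/fix-dict-keys.py | find_section_end
-- ===== SOURCE A (Python) =====
-- def find_section_end(content, section_name):
--     """Find the line index of the closing '},\n' for a top-level section."""
--     marker = f'  {section_name}: {{'
--     lines = content.split('\n')
--     inside = False
--     depth = 0
--     for i, line in enumerate(lines):
--         if not inside:
--             if line.strip().startswith(f'{section_name}: {{') and line.startswith('  '):
--                 inside = True
--                 depth = line.count('{') - line.count('}')
--                 if depth == 0:
--                     return i  # single-line section
--         else:
--             depth += line.count('{') - line.count('}')
--             if depth <= 0: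
--                 return i
--     return -1
-- ===== SOURCE B (Python) =====
-- def find_section_end(content, section_name):
--     """Find the line index of the closing '},\n' for a top-level section.
--
--     Precompute per-line brace deltas and their prefix sums, locate the
--     opening line, then pick the closing line by comparing prefix sums
--     against the prefix sum at the opening line (no running state).
--     """
--     lines = content.split('\n')
--     deltas = [ln.count('{') - ln.count('}') for ln in lines]
--     prefix = [0]
--     total = 0
--     for d in deltas:
--         total += d
--         prefix.append(total)
--     head = f'{section_name}: {{'
--     start = next((i for i, ln in enumerate(lines)
--                   if ln.strip().startswith(head) and ln.startswith('  ')), None)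
--     if start is None:
--         return -1
--     if deltas[start] == 0:
--         return start  # single-line section
--     return next((j for j in range(start + 1, len(lines))
--                  if prefix[j + 1] - prefix[start] <= 0), -1)
-- ===== Notes on version B (the rewrite author's own statement) =====
-- stated objective: alternative
-- what changed: Replaces A's single stateful scan (an 'inside' flag plus a running depth counter) by a prefix-sum formulation: per-line brace deltas and their prefix sums are precomputed once, the opening line is found by a search, and the closing line is the first later index j with prefix[j+1] - prefix[start] <= 0, read off the precomputed array instead of tracked state.
import Mathlib
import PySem

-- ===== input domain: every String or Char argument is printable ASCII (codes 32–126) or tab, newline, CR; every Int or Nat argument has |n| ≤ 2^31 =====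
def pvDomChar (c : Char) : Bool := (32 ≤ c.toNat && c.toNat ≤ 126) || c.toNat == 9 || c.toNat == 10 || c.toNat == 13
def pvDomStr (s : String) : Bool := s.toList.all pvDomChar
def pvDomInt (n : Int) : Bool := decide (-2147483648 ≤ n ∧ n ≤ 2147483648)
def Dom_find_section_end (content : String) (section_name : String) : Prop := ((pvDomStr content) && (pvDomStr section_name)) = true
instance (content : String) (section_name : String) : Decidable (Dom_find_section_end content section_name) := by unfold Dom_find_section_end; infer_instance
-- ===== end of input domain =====

-- B replaces A's stateful 'inside'/depth scan by a prefix-sum formulation: per-line brace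
-- deltas and their prefix sums are precomputed, and the closing line is selected by comparing
-- prefix sums against the prefix sum at the opening line; objective: alternative.

-- ===== PORT A =====
-- A's single loop over enumerate(lines) with state (inside, depth)
def pvALoop (section_name : String) : List (Int × String) → Bool → Int → Int
  | [], _inside, _depth => -1
  | (i, line) :: rest, inside, depth =>
    if !inside then
      if PySem.Str.startswith (PySem.Str.strip line) (section_name ++ ": {")
          && PySem.Str.startswith line "  " then
        let d : Int := (PySem.Str.count line "{" : Int) - (PySem.Str.count line "}" : Int)
        if d = 0 then i  -- single-line section
        else pvALoop section_name rest true d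
      else pvALoop section_name rest inside depth
    else
      let d : Int := depth + ((PySem.Str.count line "{" : Int) - (PySem.Str.count line "}" : Int))
      if d ≤ 0 then i else pvALoop section_name rest true d

def find_section_end (content : String) (section_name : String) : Int :=
  pvALoop section_name (PySem.List.enumerate ((PySem.Str.split? content "\n").getD []) 0) false 0

-- ===== PORT B =====
-- the comprehension body: a line's brace delta
def pvDelta (ln : String) : Int :=
  (PySem.Str.count ln "{" : Int) - (PySem.Str.count ln "}" : Int)

-- the prefix-sum building loop (total accumulator, values appended in order)
def pvPrefixLoop : List Int → Int → List Int
  | [], _total => []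
  | d :: ds, total => (total + d) :: pvPrefixLoop ds (total + d)

-- 'next((i for i, ln in enumerate(lines) if …), None)'
def pvFindStart (head : String) : List (Int × String) → Option Int
  | [] => none
  | (i, ln) :: rest =>
    if PySem.Str.startswith (PySem.Str.strip ln) head && PySem.Str.startswith ln "  "
    then some i else pvFindStart head rest

-- 'next((j for j in range(start+1, len(lines)) if prefix[j+1] - prefix[start] <= 0), -1)'
-- (prefix[j+1] is always in range here, so the total pyGetD is exact)
def pvFindClose (prefixL : List Int) (pstart : Int) : List Int → Int
  | [] => -1
  | j :: js =>
    if PySem.List.pyGetD prefixL (j + 1) 0 - pstart ≤ 0 then j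
    else pvFindClose prefixL pstart js

def find_section_end_alt (content : String) (section_name : String) : Int :=
  let lines := (PySem.Str.split? content "\n").getD []
  let deltas := lines.map pvDelta
  let prefixL := 0 :: pvPrefixLoop deltas 0
  match pvFindStart (section_name ++ ": {") (PySem.List.enumerate lines 0) with
  | none => -1
  | some start =>
    if PySem.List.pyGetD deltas start 0 = 0 then start  -- single-line section
    else pvFindClose prefixL (PySem.List.pyGetD prefixL start 0)
           (PySem.List.pyRange (start + 1) (lines.length : Int) 1)

-- ===== PRECONDITION & SPEC =====
def Spec_find_section_end (content : String) (section_name : String) (out : Int) : Prop := out = find_section_end_alt content section_name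
instance (content : String) (section_name : String) (out : Int) : Decidable (Spec_find_section_end content section_name out) := by unfold Spec_find_section_end; infer_instance

-- ===== CLAIM (what is proved, stated in full; the proofs are below) =====
def Claim_equal_find_section_end : Prop := ∀ (content : String) (section_name : String), Dom_find_section_end content section_name → Spec_find_section_end content section_name (find_section_end content section_name)

-- ===== LEMMAS AND PROOFS =====

-- proof-side abbreviation: A's depth-tracking tail scan
def pvScan : List (Int × String) → Int → Int
  | [], _depth => -1
  | (i, ln) :: rest, depth =>
    let d : Int := depth + pvDelta ln
    if d ≤ 0 then i else pvScan rest d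

-- A's 'inside' state is the tail scan
theorem pvALoop_true_eq_scan (name : String) (es : List (Int × String)) (d : Int) :
    pvALoop name es true d = pvScan es d := by
  induction es generalizing d with
  | nil => rfl
  | cons p rest ih =>
    obtain ⟨i, line⟩ := p
    rw [pvALoop, pvScan]
    simp only [Bool.not_true, Bool.false_eq_true, if_false, pvDelta]
    by_cases hle : d + ((PySem.Str.count line "{" : Int) - (PySem.Str.count line "}" : Int)) ≤ 0
    · simp only [hle, if_true]
    · simp only [hle, if_false]
      exact ih _

-- lookups in the prefix-sum list are sums of takes
theorem pvPrefixLoop_getD (ds : List Int) (t : Int) (k : Nat) (hk : k < ds.length) :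
    (pvPrefixLoop ds t).getD k 0 = t + (ds.take (k + 1)).sum := by
  induction ds generalizing t k with
  | nil => simp at hk
  | cons d ds ih =>
    cases k with
    | zero => simp [pvPrefixLoop]
    | succ k =>
      simp only [pvPrefixLoop, List.getD_cons_succ, List.take_succ_cons, List.sum_cons]
      rw [ih _ k (by simpa using hk)]
      ring

theorem prefix_lookup (D : List Int) (m : Nat) (hm : m ≤ D.length) :
    PySem.List.pyGetD (0 :: pvPrefixLoop D 0) (m : Int) 0 = (D.take m).sum := by
  rw [PySem.List.pyGetD_natCast]
  cases m with
  | zero => simp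
  | succ m =>
    simp only [List.getD_cons_succ]
    rw [pvPrefixLoop_getD D 0 m (by omega)]
    simp

-- the partial sum grows by one delta at a time
theorem take_sum_succ (L : List String) (m : Nat) (hm : m < L.length) :
    ((L.map pvDelta).take (m + 1)).sum = ((L.map pvDelta).take m).sum + pvDelta L[m] := by
  rw [List.take_add_one]
  simp [List.getElem?_map, List.getElem?_eq_getElem hm]

-- the tail scan equals B's prefix-sum search over range(m, n)
theorem scan_eq (L : List String) (c : Int) :
    ∀ (ws : List String) (m : Nat), L.drop m = ws →
      pvScan (PySem.List.enumerate ws (m : Int)) (((L.map pvDelta).take m).sum - c) =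
      pvFindClose (0 :: pvPrefixLoop (L.map pvDelta) 0) c
        (PySem.List.pyRange (m : Int) (L.length : Int) 1) := by
  intro ws
  induction ws with
  | nil =>
    intro m h
    have hm : L.length ≤ m := by
      by_contra hlt
      have h2 := List.drop_eq_getElem_cons (l := L) (i := m) (by omega)
      rw [h] at h2; simp at h2; omega
    rw [PySem.List.pyRange_one_eq_nil (by exact_mod_cast hm)]
    rfl
  | cons w ws ih =>
    intro m h
    have hm : m < L.length := by
      by_contra hge
      rw [List.drop_eq_nil_of_le (by omega)] at h; simp at h
    have hdrop := List.drop_eq_getElem_cons (l := L) (i := m) hm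
    rw [h] at hdrop
    obtain ⟨hw, hws⟩ : L[m] = w ∧ L.drop (m + 1) = ws := by
      constructor <;> [exact (List.cons.injEq ..▸ hdrop).1.symm; exact (List.cons.injEq ..▸ hdrop).2.symm]
    rw [PySem.List.enumerate_cons, PySem.List.pyRange_one_cons (by exact_mod_cast hm)]
    rw [pvScan, pvFindClose]
    have hcast : (m : Int) + 1 = ((m + 1 : Nat) : Int) := by push_cast; ring
    have hsum : ((L.map pvDelta).take m).sum - c + pvDelta w = ((L.map pvDelta).take (m + 1)).sum - c := by
      rw [take_sum_succ L m hm, hw]; ring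
    have hpre : PySem.List.pyGetD (0 :: pvPrefixLoop (L.map pvDelta) 0) ((m : Int) + 1) 0 =
        ((L.map pvDelta).take (m + 1)).sum := by
      rw [hcast, prefix_lookup _ (m + 1) (by simpa using hm)]
    simp only [hsum, hpre]
    by_cases hle : ((L.map pvDelta).take (m + 1)).sum - c ≤ 0
    · simp only [hle, if_true]
    · simp only [hle, if_false]
      rw [hcast]
      exact ih (m + 1) hws

-- A's full loop equals B's find-then-select over any suffix
theorem pvALoop_eq_alt (name : String) (L : List String) :
    ∀ (ws : List String) (m : Nat) (d0 : Int), L.drop m = ws →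
      pvALoop name (PySem.List.enumerate ws (m : Int)) false d0 =
      (match pvFindStart (name ++ ": {") (PySem.List.enumerate ws (m : Int)) with
       | none => -1
       | some start =>
         if PySem.List.pyGetD (L.map pvDelta) start 0 = 0 then start
         else pvFindClose (0 :: pvPrefixLoop (L.map pvDelta) 0)
                (PySem.List.pyGetD (0 :: pvPrefixLoop (L.map pvDelta) 0) start 0)
                (PySem.List.pyRange (start + 1) (L.length : Int) 1)) := by
  intro ws
  induction ws with
  | nil => intro m d0 _; rfl
  | cons w ws ih =>
    intro m d0 h
    have hm : m < L.length := by
      by_contra hge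
      rw [List.drop_eq_nil_of_le (by omega)] at h; simp at h
    have hdrop := List.drop_eq_getElem_cons (l := L) (i := m) hm
    rw [h] at hdrop
    obtain ⟨hw, hws⟩ : L[m] = w ∧ L.drop (m + 1) = ws := by
      constructor <;> [exact (List.cons.injEq ..▸ hdrop).1.symm; exact (List.cons.injEq ..▸ hdrop).2.symm]
    rw [PySem.List.enumerate_cons, pvALoop, pvFindStart]
    simp only [Bool.not_false, if_true]
    have hcast : (m : Int) + 1 = ((m + 1 : Nat) : Int) := by push_cast; ring
    by_cases hpred : (PySem.Str.startswith (PySem.Str.strip w) (name ++ ": {")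
        && PySem.Str.startswith w "  ") = true
    · simp only [hpred, if_true]
      have hdl : PySem.List.pyGetD (L.map pvDelta) (m : Int) 0 = pvDelta w := by
        rw [PySem.List.pyGetD_natCast]
        simp [List.getD_eq_getElem?_getD, List.getElem?_map, List.getElem?_eq_getElem hm, hw]
      by_cases hd : ((PySem.Str.count w "{" : Int) - (PySem.Str.count w "}" : Int)) = 0
      · have hz : pvDelta w = 0 := hd
        simp only [hd, if_true, hdl, hz]
      · have hpd : ¬ pvDelta w = 0 := hd
        simp only [hd, if_false, hdl, hpd]
        rw [pvALoop_true_eq_scan, hcast]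
        have hstart : PySem.List.pyGetD (0 :: pvPrefixLoop (L.map pvDelta) 0) (m : Int) 0 =
            ((L.map pvDelta).take m).sum := prefix_lookup _ m (by simp; omega)
        have hacc : ((PySem.Str.count w "{" : Int) - (PySem.Str.count w "}" : Int)) =
            ((L.map pvDelta).take (m + 1)).sum - ((L.map pvDelta).take m).sum := by
          rw [take_sum_succ L m hm, hw]; unfold pvDelta; ring
        rw [hacc, scan_eq L _ ws (m + 1) hws, hstart]
    · simp only [hpred]
      rw [hcast]
      exact ih (m + 1) d0 hws

-- ===== VERDICT (by name: the statement is the Claim_ definition above) =====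
theorem find_section_end_spec : Claim_equal_find_section_end := by
  intro content section_name _
  unfold Spec_find_section_end find_section_end find_section_end_alt
  have h := pvALoop_eq_alt section_name ((PySem.Str.split? content "\n").getD [])
      ((PySem.Str.split? content "\n").getD []) 0 0 (by simp)
  simpa using h
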